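-- pv_equiv track=rewrite | github.com/maxmarkov/FDToolbox_py3 | fdtoolbox/atomic/utility.py | iterate_all_indices
-- ===== SOURCE A (Python) =====
-- def iterate_all_indices(shape,shape_min=None):
--   """
--   Generator function for looping through all possible combinations of the values in given ranges.
--   """
--   if shape_min is None:
--     shape_min = [0]*len(shape)
--
--   for i in range(int(shape_min[0]),int(shape[0])):
--     if len(shape) > 1:
--       for k in iterate_all_indices(shape[1:], shape_min[1:]):
--         yield [i]+k
--     else:
--       yield [i]
-- ===== SOURCE B (Python) =====
-- def iterate_all_indices(shape, shape_min=None):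
--   """
--   Generator over all index combinations, built iteratively: extend a table of
--   row prefixes one dimension at a time instead of recursing per dimension.
--   """
--   if shape_min is None:
--     shape_min = [0]*len(shape)
--   dims = [(int(shape_min[i]), int(shape[i])) for i in range(len(shape))]
--   rows = [[]]
--   for lo, hi in dims:
--     rows = [r + [i] for r in rows for i in range(lo, hi)]
--   yield from rows
-- ===== Notes on version B (the rewrite author's own statement) =====
-- stated objective: alternative
-- what changed: A is a recursive generator (outer loop per dimension, recursing on shape[1:]); B builds the per-dimension (min,max) pairs once and iteratively extends a table of row prefixes one dimension at a time with a single fold, yielding the finished rows.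
-- outside the precondition, e.g. on iterate_all_indices([0, 3], [0]): A returns [], B raises IndexError; on iterate_all_indices([2, 3], [0]): A raises IndexError, B raises IndexError
import Mathlib
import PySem

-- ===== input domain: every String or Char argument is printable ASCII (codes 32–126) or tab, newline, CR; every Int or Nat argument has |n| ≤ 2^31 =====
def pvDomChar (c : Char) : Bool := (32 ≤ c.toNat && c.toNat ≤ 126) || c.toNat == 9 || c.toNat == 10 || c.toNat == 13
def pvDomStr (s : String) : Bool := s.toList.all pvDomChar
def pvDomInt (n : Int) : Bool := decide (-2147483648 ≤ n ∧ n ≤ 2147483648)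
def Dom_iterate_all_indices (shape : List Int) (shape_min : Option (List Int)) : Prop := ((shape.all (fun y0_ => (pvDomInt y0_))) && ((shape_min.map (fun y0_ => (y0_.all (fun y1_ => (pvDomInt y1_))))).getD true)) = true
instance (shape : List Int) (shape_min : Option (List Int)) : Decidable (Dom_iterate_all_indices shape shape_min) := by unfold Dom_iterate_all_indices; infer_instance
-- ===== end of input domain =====

-- B replaces A's per-dimension recursion by an iterative table of row prefixes extended
-- one dimension at a time (alternative decomposition; same cost). Both Python versions are
-- generators; the equivalence proved here is about the sequence of yielded values.

-- ===== PORT A =====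
-- recursive generator body: loops over range(int(shape_min[0]), int(shape[0])), recursing on shape[1:]
def iaA : List Int → List Int → List (List Int)
  | [], _ => []        -- unreachable under Pre_ (Python raises IndexError on shape_min[0]/shape[0])
  | s0 :: rest, smin =>
    (PySem.List.pyRange (PySem.List.pyGetD smin 0 0) s0 1).flatMap
      (fun i => if 0 < rest.length
                then (iaA rest (PySem.List.slice smin (some 1) none)).map (fun k => i :: k)
                else [[i]])

def iterate_all_indices (shape : List Int) (shape_min : Option (List Int)) : List (List Int) :=
  let smin := match shape_min with
    | none => List.replicate shape.length 0
    | some m => m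
  iaA shape smin

-- ===== PORT B =====
-- one extension step: every existing prefix r gets every index i of the current dimension appended
def extStep (rows : List (List Int)) (lh : Int × Int) : List (List Int) :=
  rows.flatMap (fun r => (PySem.List.pyRange lh.1 lh.2 1).map (fun i => r ++ [i]))

-- dims = [(int(shape_min[i]), int(shape[i])) for i in range(len(shape))], then the fold over dims
def tableB (shape smin : List Int) : List (List Int) :=
  (((List.range shape.length).map
      (fun i => (PySem.List.pyGetD smin (i : Int) 0, PySem.List.pyGetD shape (i : Int) 0)))).foldl
    extStep [[]]

def iterate_all_indices_alt (shape : List Int) (shape_min : Option (List Int)) : List (List Int) :=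
  let smin := match shape_min with
    | none => List.replicate shape.length 0
    | some m => m
  tableB shape smin

-- ===== PRECONDITION & SPEC =====
-- Pre_ excludes shape = [] (A raises IndexError on shape[0]) and a given shape_min shorter than
-- shape: there A raises IndexError on shape_min[i] unless an earlier empty range hides the access
-- (e.g. shape=[0,3], shape_min=[0], where A yields nothing); B's eager per-dimension int()
-- conversion raises IndexError on all such short-shape_min inputs, so they lie outside Pre_.
def Pre_iterate_all_indices (shape : List Int) (shape_min : Option (List Int)) : Prop :=
  shape ≠ [] ∧ shape_min.all (fun m => decide (shape.length ≤ m.length)) = true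
instance (shape : List Int) (shape_min : Option (List Int)) : Decidable (Pre_iterate_all_indices shape shape_min) := by unfold Pre_iterate_all_indices; infer_instance

def pvWitness_iterate_all_indices : List Int × Option (List Int) := ([2, 3], some [1, 0])

def Spec_iterate_all_indices (shape : List Int) (shape_min : Option (List Int)) (out : List (List Int)) : Prop := out = iterate_all_indices_alt shape shape_min
instance (shape : List Int) (shape_min : Option (List Int)) (out : List (List Int)) : Decidable (Spec_iterate_all_indices shape shape_min out) := by unfold Spec_iterate_all_indices; infer_instance

-- ===== CLAIM (what is proved, stated in full; the proofs are below) =====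
def Claim_equal_iterate_all_indices : Prop := ∀ (shape : List Int) (shape_min : Option (List Int)), Dom_iterate_all_indices shape shape_min → Pre_iterate_all_indices shape shape_min → Spec_iterate_all_indices shape shape_min (iterate_all_indices shape shape_min)

-- ===== LEMMAS AND PROOFS =====

-- folding extStep over any starting table = per-row copies of the fold started from the empty prefix
lemma foldl_extStep_flat (ds : List (Int × Int)) :
    ∀ rows : List (List Int),
      ds.foldl extStep rows = rows.flatMap (fun r => (ds.foldl extStep [[]]).map (r ++ ·)) := by
  induction ds with
  | nil => intro rows; simp [List.foldl]
  | cons d ds ih =>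
    intro rows
    simp only [List.foldl_cons]
    rw [ih (extStep rows d), ih (extStep [[]] d)]
    simp [extStep, List.flatMap_map, List.map_flatMap, List.map_map, Function.comp_def, List.append_assoc, List.flatMap_assoc]

-- the dims list of a cons input splits off its head dimension
lemma dims_cons (s0 m0 : Int) (rest mrest : List Int) :
    (List.range (s0 :: rest).length).map
        (fun i => (PySem.List.pyGetD (m0 :: mrest) (i : Int) 0,
                   PySem.List.pyGetD (s0 :: rest) (i : Int) 0))
      = (m0, s0) ::
        (List.range rest.length).map
          (fun i => (PySem.List.pyGetD mrest (i : Int) 0, PySem.List.pyGetD rest (i : Int) 0)) := by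
  have h : ∀ a : Nat,
      (PySem.List.pyGetD (m0 :: mrest) ((a : Int) + 1) 0,
       PySem.List.pyGetD (s0 :: rest) ((a : Int) + 1) 0)
      = (PySem.List.pyGetD mrest (a : Int) 0, PySem.List.pyGetD rest (a : Int) 0) := by
    intro a
    have hc : ((a : Int) + 1) = ((a + 1 : Nat) : Int) := by push_cast; ring
    rw [hc, PySem.List.pyGetD_natCast, PySem.List.pyGetD_natCast,
        PySem.List.pyGetD_natCast, PySem.List.pyGetD_natCast]
    simp
  simp [List.length_cons, List.range_succ_eq_map, List.flatMap_map, List.map_flatMap, h]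

lemma iaA_cons (s0 : Int) (rest smin : List Int) :
    iaA (s0 :: rest) smin =
      (PySem.List.pyRange (PySem.List.pyGetD smin 0 0) s0 1).flatMap
        (fun i => if 0 < rest.length
                  then (iaA rest (PySem.List.slice smin (some 1) none)).map (fun k => i :: k)
                  else [[i]]) := rfl

lemma iaA_eq_tableB : ∀ (shape smin : List Int), shape ≠ [] → shape.length ≤ smin.length →
    iaA shape smin = tableB shape smin := by
  intro shape
  induction shape with
  | nil => intro _ h _; exact absurd rfl h
  | cons s0 rest ih =>
    intro smin _ hlen
    match smin with
    | [] => simp at hlen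
    | m0 :: mrest =>
      have hsl : PySem.List.slice (m0 :: mrest) (some 1) none = mrest := by
        rw [PySem.List.slice_from_one]; rfl
      unfold tableB
      rw [dims_cons, List.foldl_cons, foldl_extStep_flat]
      rw [iaA_cons, hsl]
      by_cases hr : rest = []
      · subst hr
        simp [extStep, List.flatMap_map, PySem.List.pyGetD_zero_cons]
      · have hIH := ih mrest hr (by simpa using hlen)
        have htb : List.foldl extStep [[]]
            ((List.range rest.length).map
              (fun i => (PySem.List.pyGetD mrest (i : Int) 0, PySem.List.pyGetD rest (i : Int) 0)))
            = tableB rest mrest := rfl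
        have hp : 0 < rest.length := List.length_pos_of_ne_nil hr
        rw [htb, ← hIH]
        simp [extStep, List.flatMap_map, PySem.List.pyGetD_zero_cons, hp]

-- ===== VERDICT (by name: the statement is the Claim_ definition above) =====
theorem iterate_all_indices_spec : Claim_equal_iterate_all_indices := by
  intro shape shape_min _ hPre
  unfold Spec_iterate_all_indices iterate_all_indices iterate_all_indices_alt
  obtain ⟨hne, hmin⟩ := hPre
  cases shape_min with
  | none => exact iaA_eq_tableB shape _ hne (by simp)
  | some m => exact iaA_eq_tableB shape m hne (by simpa [Option.all] using hmin)
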